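-- pv_equiv track=rewrite | github.com/RMSnow/HAT | evaluation/texture/get_texture_stability.py | get_chord_level_texture
-- ===== SOURCE A (Python) =====
-- def get_chord_level_texture(bars, max_pitch=-1):
--     beats = [beat for bar in bars for beat in bar]
--
--     chord_groups = []
--     curr_chord = []
--     for beat in beats:
--         if len(beat) == 0:
--             curr_chord.append(0)
--             continue
--
--         if 'chord' in beat[0] and len(curr_chord) != 0:
--             chord_groups.append(curr_chord)
--             curr_chord = []
--
--         notes = [event for event in beat if 'note' in event]
--         if max_pitch != -1:
--             notes = [n for n in notes if n['note'] <= max_pitch]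
--
--         if len(notes) > 0:
--             curr_chord.append(1)
--         else:
--             curr_chord.append(0)
--
--     if len(curr_chord) != 0:
--         chord_groups.append(curr_chord)
--
--     return chord_groups
-- ===== SOURCE B (Python) =====
-- def get_chord_level_texture(bars, max_pitch=-1):
--     beats = [beat for bar in bars for beat in bar]
--
--     def keep(event):
--         return 'note' in event and (max_pitch == -1 or event['note'] <= max_pitch)
--
--     pairs = [(len(beat) > 0 and 'chord' in beat[0],
--               0 if len(beat) == 0 else int(any(keep(event) for event in beat)))
--              for beat in beats]
--
--     def split(ps):
--         # ps is nonempty; its first value always opens a group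
--         group = [ps[0][1]]
--         rest = ps[1:]
--         while rest and not rest[0][0]:
--             group.append(rest[0][1])
--             rest = rest[1:]
--         return [group] + (split(rest) if rest else [])
--
--     return split(pairs) if pairs else []
-- ===== Notes on version B (the rewrite author's own statement) =====
-- stated objective: alternative
-- what changed: A's single fused loop carrying (chord_groups, curr_chord) state is replaced by a map of each beat to a (chord-start flag, note-presence value) pair followed by a recursive splitter that cuts the value list immediately before each flagged beat (the first beat never opens a cut).
import Mathlib
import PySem

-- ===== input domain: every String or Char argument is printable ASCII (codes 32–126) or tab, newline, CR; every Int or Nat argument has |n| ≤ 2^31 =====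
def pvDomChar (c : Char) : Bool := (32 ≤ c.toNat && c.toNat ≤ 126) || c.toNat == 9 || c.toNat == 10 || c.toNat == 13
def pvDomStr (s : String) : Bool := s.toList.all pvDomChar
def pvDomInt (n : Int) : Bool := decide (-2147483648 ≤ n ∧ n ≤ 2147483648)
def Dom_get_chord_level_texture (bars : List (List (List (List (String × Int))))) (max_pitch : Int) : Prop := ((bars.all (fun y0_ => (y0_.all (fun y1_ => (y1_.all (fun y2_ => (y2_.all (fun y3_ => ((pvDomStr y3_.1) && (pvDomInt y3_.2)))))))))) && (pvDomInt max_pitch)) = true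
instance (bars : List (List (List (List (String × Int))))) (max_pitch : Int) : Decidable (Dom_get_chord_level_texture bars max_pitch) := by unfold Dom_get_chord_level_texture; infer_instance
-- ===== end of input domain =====

-- B replaces A's fused grouping loop by a per-beat (flag, value) mapping pass plus a recursive
-- boundary splitter; same cost, different decomposition (objective: alternative).
-- ===== PORT A =====
-- shared dict primitives: 'k in d' and d['note'] on an association-list dict (first match),
-- exact for Python dicts (which cannot hold duplicate keys)
def pvHasKey (ev : List (String × Int)) (k : String) : Bool := (PySem.Dict.mk ev).contains k
def pvNoteVal (ev : List (String × Int)) : Int := ((PySem.Dict.mk ev).get? "note").getD 0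

-- the body of A's for-loop over beats, state = (chord_groups, curr_chord)
def pvStepA (max_pitch : Int) (st : List (List Int) × List Int)
    (beat : List (List (String × Int))) : List (List Int) × List Int :=
  if beat.length = 0 then (st.1, st.2 ++ [0])
  else
    let st' :=
      if pvHasKey beat.headI "chord" ∧ st.2.length ≠ 0 then (st.1 ++ [st.2], ([] : List Int))
      else st
    let notes := beat.filter (fun event => pvHasKey event "note")
    let notes := if max_pitch ≠ -1 then notes.filter (fun n => pvNoteVal n ≤ max_pitch) else notes
    if notes.length > 0 then (st'.1, st'.2 ++ [1]) else (st'.1, st'.2 ++ [0])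

def get_chord_level_texture (bars : List (List (List (List (String × Int))))) (max_pitch : Int) : List (List Int) :=
  let beats := bars.flatMap (fun bar => bar)
  let st := beats.foldl (pvStepA max_pitch) ([], [])
  if st.2.length ≠ 0 then st.1 ++ [st.2] else st.1

-- ===== PORT B =====
-- Source B's helper `keep`
def pvKeep (max_pitch : Int) (event : List (String × Int)) : Bool :=
  pvHasKey event "note" && (max_pitch == -1 || pvNoteVal event ≤ max_pitch)

-- the element expression of Source B's `pairs` comprehension: (chord-start flag, beat value)
def pvPairB (max_pitch : Int) (beat : List (List (String × Int))) : Bool × Int :=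
  (decide (beat.length > 0) && pvHasKey beat.headI "chord",
   if beat.length = 0 then 0 else (if beat.any (pvKeep max_pitch) then 1 else 0))

-- Source B's inner while loop: extend `group` until the next flagged pair (or the end)
def pvSplitLoop (group : List Int) (rest : List (Bool × Int)) : List Int × List (Bool × Int) :=
  match rest with
  | [] => (group, [])
  | p :: rs => if p.1 then (group, p :: rs) else pvSplitLoop (group ++ [p.2]) rs

theorem pvSplitLoop_len (group : List Int) (rest : List (Bool × Int)) :
    (pvSplitLoop group rest).2.length ≤ rest.length := by
  induction rest generalizing group with
  | nil => simp [pvSplitLoop]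
  | cons p rs ih =>
    simp only [pvSplitLoop]
    split
    · simp
    · exact le_trans (ih _) (by simp)

-- Source B's recursive `split`
def pvSplit (ps : List (Bool × Int)) : List (List Int) :=
  match ps with
  | [] => []
  | p :: rest =>
    let r := pvSplitLoop [p.2] rest
    [r.1] ++ (if r.2 = [] then [] else pvSplit r.2)
termination_by ps.length
decreasing_by
  have := pvSplitLoop_len [p.2] rest
  simp_all [r]

def get_chord_level_texture_alt (bars : List (List (List (List (String × Int))))) (max_pitch : Int) : List (List Int) :=
  let beats := bars.flatMap (fun bar => bar)
  let pairs := beats.map (pvPairB max_pitch)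
  if pairs ≠ [] then pvSplit pairs else []

-- ===== PRECONDITION & SPEC =====
def Spec_get_chord_level_texture (bars : List (List (List (List (String × Int))))) (max_pitch : Int) (out : List (List Int)) : Prop := out = get_chord_level_texture_alt bars max_pitch
instance (bars : List (List (List (List (String × Int))))) (max_pitch : Int) (out : List (List Int)) : Decidable (Spec_get_chord_level_texture bars max_pitch out) := by unfold Spec_get_chord_level_texture; infer_instance

-- ===== CLAIM (what is proved, stated in full; the proofs are below) =====
def Claim_equal_get_chord_level_texture : Prop := ∀ (bars : List (List (List (List (String × Int))))) (max_pitch : Int), Dom_get_chord_level_texture bars max_pitch → Spec_get_chord_level_texture bars max_pitch (get_chord_level_texture bars max_pitch)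

-- ===== LEMMAS AND PROOFS =====

-- reference grouping function: current group `curr`, remaining beats
def pvCore (max_pitch : Int) (curr : List Int) : List (List (List (String × Int))) → List (List Int)
  | [] => [curr]
  | b :: bs =>
    if (pvPairB max_pitch b).1 then curr :: pvCore max_pitch [(pvPairB max_pitch b).2] bs
    else pvCore max_pitch (curr ++ [(pvPairB max_pitch b).2]) bs

-- A's "len(notes) > 0" is B's "any(keep(event) for event in beat)"
theorem pv_any_iff (max_pitch : Int) (b : List (List (String × Int))) :
    ((if max_pitch ≠ -1 then
        (b.filter (fun event => pvHasKey event "note")).filter (fun n => decide (pvNoteVal n ≤ max_pitch))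
      else b.filter (fun event => pvHasKey event "note")).length > 0)
    ↔ b.any (pvKeep max_pitch) = true := by
  by_cases hm : max_pitch = -1 <;>
    simp [hm, pvKeep, List.length_pos_iff, List.eq_nil_iff_forall_not_mem, List.any_eq_true,
      List.mem_filter, and_comm, and_assoc]

-- one step of A's loop, characterised by B's (flag, value) pair
theorem pvStepA_eq (max_pitch : Int) (gs : List (List Int)) (curr : List Int)
    (b : List (List (String × Int))) :
    pvStepA max_pitch (gs, curr) b =
      if (pvPairB max_pitch b).1 = true ∧ curr.length ≠ 0 then
        (gs ++ [curr], [(pvPairB max_pitch b).2])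
      else (gs, curr ++ [(pvPairB max_pitch b).2]) := by
  by_cases hb : b.length = 0
  · simp [pvStepA, pvPairB, hb]
  · simp only [pvStepA, if_neg hb]
    by_cases hch : (pvHasKey b.headI "chord" = true ∧ (gs, curr).2.length ≠ 0)
    · have hrhs : ((pvPairB max_pitch b).1 = true ∧ curr.length ≠ 0) :=
        ⟨by simp [pvPairB, hb, hch.1, Nat.pos_of_ne_zero hb], by simpa using hch.2⟩
      by_cases ha : b.any (pvKeep max_pitch) = true
      · have hlen := (pv_any_iff max_pitch b).mpr ha
        rw [if_pos hlen, if_pos hch, if_pos hrhs]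
        simp [pvPairB, hb, ha]
      · have hlen : ¬ ((if max_pitch ≠ -1 then
            (b.filter (fun event => pvHasKey event "note")).filter
              (fun n => decide (pvNoteVal n ≤ max_pitch))
          else b.filter (fun event => pvHasKey event "note")).length > 0) :=
          fun h => ha ((pv_any_iff max_pitch b).mp h)
        rw [if_neg hlen, if_pos hch, if_pos hrhs]
        simp [pvPairB, hb, ha]
    · have hrhs : ¬ ((pvPairB max_pitch b).1 = true ∧ curr.length ≠ 0) := by
        rintro ⟨h1, h2⟩
        have h1' : 0 < b.length ∧ pvHasKey b.headI "chord" = true := by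
          simpa [pvPairB] using h1
        exact hch ⟨h1'.2, by simpa using h2⟩
      by_cases ha : b.any (pvKeep max_pitch) = true
      · have hlen := (pv_any_iff max_pitch b).mpr ha
        rw [if_pos hlen, if_neg hch, if_neg hrhs]
        simp [pvPairB, hb, ha]
      · have hlen : ¬ ((if max_pitch ≠ -1 then
            (b.filter (fun event => pvHasKey event "note")).filter
              (fun n => decide (pvNoteVal n ≤ max_pitch))
          else b.filter (fun event => pvHasKey event "note")).length > 0) :=
          fun h => ha ((pv_any_iff max_pitch b).mp h)
        rw [if_neg hlen, if_neg hch, if_neg hrhs]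
        simp [pvPairB, hb, ha]

-- A's whole loop + final flush equals pvCore, for a nonempty current group
theorem pv_foldA_core (max_pitch : Int) (bs : List (List (List (String × Int))))
    (gs : List (List Int)) (curr : List Int) (hc : curr ≠ []) :
    (if (bs.foldl (pvStepA max_pitch) (gs, curr)).2.length ≠ 0 then
        (bs.foldl (pvStepA max_pitch) (gs, curr)).1 ++ [(bs.foldl (pvStepA max_pitch) (gs, curr)).2]
      else (bs.foldl (pvStepA max_pitch) (gs, curr)).1)
    = gs ++ pvCore max_pitch curr bs := by
  induction bs generalizing gs curr with
  | nil => simp [pvCore, List.length_eq_zero_iff, hc]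
  | cons b bs ih =>
    have hlen : curr.length ≠ 0 := by simp [List.length_eq_zero_iff, hc]
    rw [List.foldl_cons, pvStepA_eq]
    by_cases hcond : ((pvPairB max_pitch b).1 = true ∧ curr.length ≠ 0)
    · rw [if_pos hcond, ih (gs ++ [curr]) [(pvPairB max_pitch b).2] (by simp)]
      simp [pvCore, hcond.1]
    · rw [if_neg hcond, ih gs (curr ++ [(pvPairB max_pitch b).2]) (by simp)]
      have hflag : (pvPairB max_pitch b).1 = false := by
        cases h : (pvPairB max_pitch b).1
        · rfl
        · exact absurd ⟨h, hlen⟩ hcond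
      simp [pvCore, hflag]

-- pvCore is B's recursive split on the mapped (flag, value) pairs
theorem pv_core_split (max_pitch : Int) (bs : List (List (List (String × Int))))
    (group : List Int) :
    pvCore max_pitch group bs
    = (pvSplitLoop group (bs.map (pvPairB max_pitch))).1 ::
      (if (pvSplitLoop group (bs.map (pvPairB max_pitch))).2 = [] then []
       else pvSplit (pvSplitLoop group (bs.map (pvPairB max_pitch))).2) := by
  induction bs generalizing group with
  | nil => simp [pvCore, pvSplitLoop]
  | cons b bs ih =>
    cases hflag : (pvPairB max_pitch b).1 with
    | false =>
      rw [show pvCore max_pitch group (b :: bs)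
            = pvCore max_pitch (group ++ [(pvPairB max_pitch b).2]) bs from by
          simp [pvCore, hflag]]
      rw [List.map_cons,
        show pvSplitLoop group (pvPairB max_pitch b :: bs.map (pvPairB max_pitch))
            = pvSplitLoop (group ++ [(pvPairB max_pitch b).2]) (bs.map (pvPairB max_pitch)) from by
          simp [pvSplitLoop, hflag]]
      exact ih (group ++ [(pvPairB max_pitch b).2])
    | true =>
      rw [show pvCore max_pitch group (b :: bs)
            = group :: pvCore max_pitch [(pvPairB max_pitch b).2] bs from by
          simp [pvCore, hflag]]
      rw [List.map_cons,
        show pvSplitLoop group (pvPairB max_pitch b :: bs.map (pvPairB max_pitch))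
            = (group, pvPairB max_pitch b :: bs.map (pvPairB max_pitch)) from by
          simp [pvSplitLoop, hflag]]
      rw [if_neg (by simp)]
      simp only [pvSplit, List.singleton_append]
      rw [ih [(pvPairB max_pitch b).2]]

-- ===== VERDICT (by name: the statement is the Claim_ definition above) =====
theorem get_chord_level_texture_spec : Claim_equal_get_chord_level_texture := by
  intro bars max_pitch _
  unfold Spec_get_chord_level_texture get_chord_level_texture get_chord_level_texture_alt
  cases hbeats : bars.flatMap (fun bar => bar) with
  | nil => simp
  | cons b bs =>
    simp only [List.map_cons, ne_eq, reduceCtorEq, not_false_iff, if_true, List.foldl_cons]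
    rw [pvStepA_eq]
    rw [if_neg (show ¬ ((pvPairB max_pitch b).1 = true ∧ ¬ ([] : List Int).length = 0) by simp)]
    rw [pv_foldA_core max_pitch bs [] ([] ++ [(pvPairB max_pitch b).2]) (by simp)]
    simp only [pvSplit, List.singleton_append, List.nil_append]
    exact pv_core_split max_pitch bs [(pvPairB max_pitch b).2]
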